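-- pv_equiv track=rewrite | github.com/HueyAnthonyDisward/Pac-man-with-search-algorithm. | Pac-Hiếu-man/AC3.py | min_consistent_ac3
-- ===== SOURCE A (Python) =====
-- def min_consistent_ac3(grid):
--     rows, cols = len(grid), len(grid[0])
--     directions = [(-1, 0), (1, 0), (0, -1), (0, 1)]  # Các hướng di chuyển: lên, xuống, trái, phải
--
--     possible_moves = {(r, c): [] for r in range(rows) for c in range(cols) if grid[r][c] != '1'}
--
--     for r in range(rows):
--         for c in range(cols):
--             if grid[r][c] != '1':  # Không phải tường
--                 for dr, dc in directions:
--                     nr, nc = r + dr, c + dc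
--                     if 0 <= nr < rows and 0 <= nc < cols and grid[nr][nc] != '1':
--                         possible_moves[(r, c)].append((nr, nc))
--
--     queue = list(possible_moves.keys())
--     while queue:
--         current = queue.pop(0)
--         updated = False
--         neighbors = possible_moves[current]
--
--         if not neighbors:
--             del possible_moves[current]
--             updated = True
--
--         for neighbor in neighbors:
--             if neighbor in possible_moves and current not in possible_moves[neighbor]:
--                 possible_moves[neighbor].remove(current)
--                 updated = True
--
--             if updated:
--                 queue.append(neighbor)
--
--     return possible_moves
-- ===== SOURCE B (Python) =====
-- def min_consistent_ac3(grid):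
--     rows, cols = len(grid), len(grid[0])
--
--     def nbrs(r, c):
--         return [(nr, nc) for nr, nc in ((r - 1, c), (r + 1, c), (r, c - 1), (r, c + 1))
--                 if 0 <= nr < rows and 0 <= nc < cols and grid[nr][nc] != '1']
--
--     return {(r, c): ns
--             for r in range(rows) for c in range(cols)
--             if grid[r][c] != '1' and (ns := nbrs(r, c))}
-- ===== Notes on version B (the rewrite author's own statement) =====
-- stated objective: simpler
-- what changed: Replaces A's mutable dict built in two passes plus an AC3 worklist loop (queue.pop(0)/append, in-place deletions and removals) by a single dict comprehension that computes each non-wall cell's neighbor list inline and keeps it only if non-empty; the worklist never removes anything but empty entries, so the whole queue traversal disappears.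
import Mathlib
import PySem

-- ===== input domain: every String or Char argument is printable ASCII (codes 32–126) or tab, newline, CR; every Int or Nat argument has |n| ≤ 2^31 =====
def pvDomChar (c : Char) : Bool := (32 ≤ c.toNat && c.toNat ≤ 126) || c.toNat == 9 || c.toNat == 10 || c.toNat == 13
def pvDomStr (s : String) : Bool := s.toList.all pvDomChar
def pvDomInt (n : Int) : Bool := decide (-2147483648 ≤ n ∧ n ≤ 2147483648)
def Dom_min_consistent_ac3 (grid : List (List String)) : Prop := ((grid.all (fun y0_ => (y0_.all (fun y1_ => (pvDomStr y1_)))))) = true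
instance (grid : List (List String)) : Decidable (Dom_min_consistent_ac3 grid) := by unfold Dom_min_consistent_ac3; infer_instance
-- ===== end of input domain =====

-- B drops A's AC3 worklist loop (which only ever deletes empty neighbor lists) and returns one
-- comprehension-style scan keeping non-wall cells with a non-empty neighbor list: simpler, same output.

-- grid[r][c] for indices the ports only use when 0 ≤ index < length (Python-exact there)
def pvCell (grid : List (List String)) (r c : Int) : String :=
  PySem.List.pyGetD (PySem.List.pyGetD grid r []) c ""

-- ===== PORT A =====
-- body of `for neighbor in neighbors:` ; state = (possible_moves, updated, queue)
def ac3Inner (cur : Int × Int)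
    (st : PySem.Dict (Int × Int) (List (Int × Int)) × Bool × List (Int × Int))
    (n : Int × Int) :
    PySem.Dict (Int × Int) (List (Int × Int)) × Bool × List (Int × Int) :=
  let (pm, upd, qs) := st
  let (pm', upd') :=
    if pm.contains n ∧ cur ∉ pm.getD n [] then
      -- `possible_moves[neighbor].remove(current)`: `remove?` is none exactly where Python
      -- raises ValueError (cur absent); such inputs are outside Pre_ (in fact unreachable there)
      (pm.insert n ((PySem.List.remove? (pm.getD n []) cur).getD (pm.getD n [])), true)
    else (pm, upd)
  (pm', upd', if upd' then qs ++ [n] else qs)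

-- `while queue:` with fuel; fuel = initial queue length suffices on every input admitted by Pre_
def ac3Loop : Nat → List (Int × Int) → PySem.Dict (Int × Int) (List (Int × Int)) →
    PySem.Dict (Int × Int) (List (Int × Int))
  | 0, _, pm => pm
  | _ + 1, [], pm => pm
  | fuel + 1, cur :: qs, pm =>
    let neighbors := pm.getD cur []
    let s := if neighbors.isEmpty then (pm.erase cur, true) else (pm, false)
    let st := neighbors.foldl (ac3Inner cur) (s.1, s.2, qs)
    ac3Loop fuel st.2.2 st.1

def min_consistent_ac3 (grid : List (List String)) : List (Int × Int × List (Int × Int)) :=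
  let rows : Int := grid.length
  let cols : Int := (PySem.List.pyGetD grid 0 []).length
  let directions : List (Int × Int) := [(-1, 0), (1, 0), (0, -1), (0, 1)]
  let pm0 := (PySem.List.pyRange 0 rows).foldl (fun d r =>
      (PySem.List.pyRange 0 cols).foldl (fun d c =>
        if pvCell grid r c ≠ "1" then d.insert (r, c) ([] : List (Int × Int)) else d) d)
      PySem.Dict.empty
  let pm1 := (PySem.List.pyRange 0 rows).foldl (fun d r =>
      (PySem.List.pyRange 0 cols).foldl (fun d c =>
        if pvCell grid r c ≠ "1" then
          directions.foldl (fun d dd =>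
            let nr := r + dd.1
            let nc := c + dd.2
            if 0 ≤ nr ∧ nr < rows ∧ 0 ≤ nc ∧ nc < cols ∧ pvCell grid nr nc ≠ "1" then
              d.modify (r, c) [] (· ++ [(nr, nc)])
            else d) d
        else d) d) pm0
  let queue := pm1.keys
  (ac3Loop queue.length queue pm1).items.map (fun p => (p.1.1, p.1.2, p.2))

-- ===== PORT B =====
def min_consistent_ac3_alt (grid : List (List String)) : List (Int × Int × List (Int × Int)) :=
  let rows : Int := grid.length
  let cols : Int := (PySem.List.pyGetD grid 0 []).length
  let nbrs := fun (r c : Int) =>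
    ([(r - 1, c), (r + 1, c), (r, c - 1), (r, c + 1)] : List (Int × Int)).filter
      (fun p => decide (0 ≤ p.1 ∧ p.1 < rows ∧ 0 ≤ p.2 ∧ p.2 < cols) && (pvCell grid p.1 p.2 != "1"))
  (PySem.List.pyRange 0 rows).flatMap (fun r =>
    (PySem.List.pyRange 0 cols).filterMap (fun c =>
      if pvCell grid r c ≠ "1" then
        let ns := nbrs r c
        if ns.isEmpty then none else some (r, c, ns)
      else none))

-- ===== PRECONDITION & SPEC =====
-- Pre_ excludes exactly the inputs where Python A raises IndexError: the empty grid (len(grid[0]))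
-- and grids where some row is shorter than row 0 (grid[r][c] with c < len(grid[0])).
def Pre_min_consistent_ac3 (grid : List (List String)) : Prop :=
  grid ≠ [] ∧ ∀ row ∈ grid, (grid.headD []).length ≤ row.length
instance (grid : List (List String)) : Decidable (Pre_min_consistent_ac3 grid) := by
  unfold Pre_min_consistent_ac3; infer_instance

def pvWitness_min_consistent_ac3 : List (List String) := [["0", "1"], ["0", "0"]]

def Spec_min_consistent_ac3 (grid : List (List String)) (out : List (Int × Int × List (Int × Int))) : Prop := out = min_consistent_ac3_alt grid
instance (grid : List (List String)) (out : List (Int × Int × List (Int × Int))) : Decidable (Spec_min_consistent_ac3 grid out) := by unfold Spec_min_consistent_ac3; infer_instance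

-- ===== CLAIM (what is proved, stated in full; the proofs are below) =====
def Claim_equal_min_consistent_ac3 : Prop := ∀ (grid : List (List String)), Dom_min_consistent_ac3 grid → Pre_min_consistent_ac3 grid → Spec_min_consistent_ac3 grid (min_consistent_ac3 grid)

-- ===== LEMMAS AND PROOFS =====

def pvNbrs (grid : List (List String)) (rows cols r c : Int) : List (Int × Int) :=
  ([(r - 1, c), (r + 1, c), (r, c - 1), (r, c + 1)] : List (Int × Int)).filter
    (fun p => decide (0 ≤ p.1 ∧ p.1 < rows ∧ 0 ≤ p.2 ∧ p.2 < cols) && (pvCell grid p.1 p.2 != "1"))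
def pvCellsL (grid : List (List String)) (rows cols : Int) : List (Int × Int) :=
  (PySem.List.pyRange 0 rows).flatMap (fun r =>
    (PySem.List.pyRange 0 cols).filterMap (fun c =>
      if pvCell grid r c ≠ "1" then some (r, c) else none))
def pvBase (grid : List (List String)) (rows cols : Int) : List ((Int × Int) × List (Int × Int)) :=
  (pvCellsL grid rows cols).map (fun k => (k, pvNbrs grid rows cols k.1 k.2))

theorem pv_assoc_unique {α β : Type} {l : List (α × β)} {n : α} {w w' : β}
    (hnd : (l.map Prod.fst).Nodup) (h1 : (n, w) ∈ l) (h2 : (n, w') ∈ l) : w = w' := by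
  induction l with
  | nil => simp at h1
  | cons p t ih =>
    simp only [List.map_cons, List.nodup_cons] at hnd
    rcases List.mem_cons.1 h1 with h1 | h1 <;> rcases List.mem_cons.1 h2 with h2 | h2
    · rw [← h1] at h2; exact (congrArg Prod.snd h2).symm
    · exact absurd (List.mem_map.2 ⟨_, h2, by rw [← h1]⟩) hnd.1
    · exact absurd (List.mem_map.2 ⟨_, h1, by rw [← h2]⟩) hnd.1
    · exact ih hnd.2 h1 h2

theorem pv_filter_flatMap_pairs {α β : Type} [BEq α] [LawfulBEq α] (l : List α) (g : α → List β)
    (k : α) (hnd : l.Nodup) (hk : k ∈ l) :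
    ((l.flatMap (fun a => (g a).map (fun b => (a, b)))).filter (fun p => p.1 == k)) =
      (g k).map (fun b => (k, b)) := by
  induction l with
  | nil => simp at hk
  | cons a t ih =>
    simp only [List.flatMap_cons, List.filter_append, List.nodup_cons] at hnd ⊢
    rcases List.mem_cons.1 hk with hk | hk
    · subst hk
      have h1 : ((g k).map (fun b => (k, b))).filter (fun p => p.1 == k) =
          (g k).map (fun b => (k, b)) := by
        rw [List.filter_eq_self]; simp
      have h2 : (t.flatMap (fun a => (g a).map (fun b => (a, b)))).filter (fun p => p.1 == k) = [] := by
        rw [List.filter_eq_nil_iff]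
        rintro ⟨pa, pb⟩ hp
        simp only [List.mem_flatMap, List.mem_map, Prod.mk.injEq] at hp
        obtain ⟨a', ha', b', hb', rfl, rfl⟩ := hp
        simp only [beq_iff_eq]
        rintro rfl
        exact hnd.1 ha'
      rw [h1, h2, List.append_nil]
    · have h1 : ((g a).map (fun b => (a, b))).filter (fun p => p.1 == k) = [] := by
        rw [List.filter_eq_nil_iff]
        rintro ⟨pa, pb⟩ hp
        simp only [List.mem_map, Prod.mk.injEq] at hp
        obtain ⟨b', hb', rfl, rfl⟩ := hp
        simp only [beq_iff_eq]
        rintro rfl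
        exact hnd.1 hk
      rw [h1, List.nil_append, ih hnd.2 hk]

theorem pv_items_eq_keys_map {ν : Type} (d : PySem.Dict (Int × Int) ν) (dflt : ν)
    (hn : d.keys.Nodup) : d.items = d.keys.map (fun k => (k, d.getD k dflt)) := by
  have : d.keys.map (fun k => (k, d.getD k dflt)) =
      d.items.map (fun p => (p.1, d.getD p.1 dflt)) := by
    simp only [PySem.Dict.keys, List.map_map]; rfl
  rw [this]
  conv_lhs => rw [← List.map_id d.items]
  apply List.map_congr_left
  rintro ⟨k, v⟩ hp
  have := PySem.Dict.getD_of_mem_items (d := d) (d0 := dflt) hp hn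
  simp [this]

theorem pv_mem_cells {grid : List (List String)} {rows cols : Int} {p : Int × Int} :
    p ∈ pvCellsL grid rows cols ↔
      0 ≤ p.1 ∧ p.1 < rows ∧ 0 ≤ p.2 ∧ p.2 < cols ∧ pvCell grid p.1 p.2 ≠ "1" := by
  rcases p with ⟨a, b⟩
  simp only [pvCellsL, List.mem_flatMap, List.mem_filterMap, PySem.List.mem_pyRange_one]
  constructor
  · rintro ⟨r, hr, c, hc, h⟩
    split at h
    · obtain ⟨rfl, rfl⟩ := Prod.mk.injEq .. ▸ (Option.some.injEq .. ▸ h)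
      exact ⟨hr.1, hr.2, hc.1, hc.2, by assumption⟩
    · simp at h
  · rintro ⟨h1, h2, h3, h4, h5⟩
    exact ⟨a, ⟨h1, h2⟩, b, ⟨h3, h4⟩, by simp [h5]⟩

theorem pv_nodup_cells (grid : List (List String)) (rows cols : Int) :
    (pvCellsL grid rows cols).Nodup := by
  unfold pvCellsL
  rw [List.nodup_flatMap]
  constructor
  · intro r _
    apply List.Nodup.filterMap _ (PySem.List.nodup_pyRange_one _ _)
    rintro c c' ⟨a, b⟩ h1 h2
    split at h1 <;> split at h2 <;> simp_all
  · apply List.Pairwise.imp _ (PySem.List.pairwise_lt_pyRange_one _ _)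
    intro r r' hlt
    simp only [Function.onFun, List.Disjoint]
    intro p hp hp'
    simp only [List.mem_filterMap] at hp hp'
    obtain ⟨c, -, h1⟩ := hp
    obtain ⟨c', -, h2⟩ := hp'
    rcases p with ⟨pa, pb⟩
    split at h1 <;> split at h2 <;>
      simp only [Option.some.injEq, Prod.mk.injEq, reduceCtorEq] at h1 h2
    obtain ⟨rfl, rfl⟩ := h1
    obtain ⟨rfl, -⟩ := h2
    exact absurd hlt (lt_irrefl _)

theorem pv_mem_nbrs {grid : List (List String)} {rows cols r c : Int} {n : Int × Int} :
    n ∈ pvNbrs grid rows cols r c ↔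
      (n ∈ ([(r - 1, c), (r + 1, c), (r, c - 1), (r, c + 1)] : List (Int × Int)) ∧
        n ∈ pvCellsL grid rows cols) := by
  rw [pv_mem_cells]
  simp only [pvNbrs, List.mem_filter, Bool.and_eq_true, decide_eq_true_eq, bne_iff_ne, ne_eq]
  tauto

theorem pv_sym {grid : List (List String)} {rows cols : Int} {k n : Int × Int}
    (hk : k ∈ pvCellsL grid rows cols) (hn : n ∈ pvNbrs grid rows cols k.1 k.2) :
    n ∈ pvCellsL grid rows cols ∧ k ∈ pvNbrs grid rows cols n.1 n.2 := by
  rw [pv_mem_nbrs] at hn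
  obtain ⟨hadj, hcell⟩ := hn
  refine ⟨hcell, ?_⟩
  rw [pv_mem_nbrs]
  refine ⟨?_, hk⟩
  rcases k with ⟨a, b⟩
  simp only [List.mem_cons, Prod.mk.injEq] at hadj ⊢
  rcases n with ⟨x, y⟩
  rcases hadj with h | h | h | h
  all_goals simp only [Prod.mk.injEq, List.not_mem_nil, or_false] at h ⊢
  all_goals omega

-- generic flattening lemmas
theorem pv_foldl_filterMap_if {α β γ : Type} (P : α → Prop) [DecidablePred P]
    (h : α → β) (g : γ → β → γ) (l : List α) (init : γ) :
    l.foldl (fun d x => if P x then g d (h x) else d) init =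
      (l.filterMap (fun x => if P x then some (h x) else none)).foldl g init := by
  induction l generalizing init with
  | nil => rfl
  | cons a t ih =>
    simp only [List.foldl_cons, List.filterMap_cons]
    by_cases hp : P a <;> simp [hp, ih]

theorem pv_per_cell (grid : List (List String)) (rows cols r c : Int)
    (d : PySem.Dict (Int × Int) (List (Int × Int))) :
    ([((-1 : Int), (0 : Int)), (1, 0), (0, -1), (0, 1)]).foldl (fun d dd =>
        let nr := r + dd.1
        let nc := c + dd.2
        if 0 ≤ nr ∧ nr < rows ∧ 0 ≤ nc ∧ nc < cols ∧ pvCell grid nr nc ≠ "1" then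
          d.modify (r, c) [] (· ++ [(nr, nc)])
        else d) d =
      ((pvNbrs grid rows cols r c).map (fun n => ((r, c), n))).foldl
        (fun d p => d.modify p.1 [] (· ++ [p.2])) d := by
  simp only [pvNbrs, List.filter_cons, List.filter_nil, List.foldl_cons, List.foldl_nil,
    Bool.and_eq_true, decide_eq_true_eq, bne_iff_ne, ne_eq]
  simp only [sub_eq_add_neg, add_zero, and_assoc]
  split_ifs <;> simp

-- keys are untouched by a modify whose key is already present
theorem pv_keys_modify_of_contains (d : PySem.Dict (Int × Int) (List (Int × Int)))
    (k : Int × Int) (f : List (Int × Int) → List (Int × Int))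
    (h : d.contains k = true) : (d.modify k [] f).keys = d.keys := by
  rw [PySem.Dict.keys_modify]
  simp only [PySem.Dict.keys, PySem.Dict.items_insert_of_contains _ _ h, List.map_map]
  apply List.map_congr_left
  rintro ⟨a, b⟩ hp
  by_cases hak : ((a, b).1 == k) = true <;> simp_all

theorem pv_keys_foldl_modify (l : List ((Int × Int) × (Int × Int)))
    (d : PySem.Dict (Int × Int) (List (Int × Int)))
    (h : ∀ p ∈ l, d.contains p.1 = true) :
    (l.foldl (fun d p => d.modify p.1 [] (· ++ [p.2])) d).keys = d.keys := by
  induction l generalizing d with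
  | nil => rfl
  | cons p t ih =>
    simp only [List.foldl_cons]
    have hc := h p (by simp)
    have hk := pv_keys_modify_of_contains d p.1 (· ++ [p.2]) hc
    have hkeys : ∀ q ∈ t, (d.modify p.1 [] (· ++ [p.2])).contains q.1 = true := by
      intro q hq
      rw [PySem.Dict.contains_iff_mem_keys, pv_keys_modify_of_contains d p.1 _ hc,
        ← PySem.Dict.contains_iff_mem_keys]
      exact h q (List.mem_cons_of_mem _ hq)
    rw [ih _ hkeys, hk]

-- A's first pass: the dict of all non-wall cells mapped to []
theorem pv_pm0 (grid : List (List String)) (rows cols : Int) :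
    ((PySem.List.pyRange 0 rows).foldl (fun d r =>
        (PySem.List.pyRange 0 cols).foldl (fun d c =>
          if pvCell grid r c ≠ "1" then d.insert (r, c) ([] : List (Int × Int)) else d) d)
        PySem.Dict.empty) =
      (pvCellsL grid rows cols).foldl (fun d k => d.insert k ([] : List (Int × Int)))
        PySem.Dict.empty := by
  rw [pvCellsL, List.foldl_flatMap]
  congr 1
  funext d r
  exact pv_foldl_filterMap_if (fun c => pvCell grid r c ≠ "1") (fun c => (r, c))
    (fun (d : PySem.Dict (Int × Int) (List (Int × Int))) k => d.insert k ([] : List (Int × Int))) _ _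

theorem pv_pm0_items (grid : List (List String)) (rows cols : Int) :
    ((pvCellsL grid rows cols).foldl (fun d k => d.insert k ([] : List (Int × Int)))
        PySem.Dict.empty).items =
      (pvCellsL grid rows cols).map (fun k => (k, ([] : List (Int × Int)))) := by
  have := PySem.Dict.items_foldl_insert_fresh (pvCellsL grid rows cols) (fun k => k)
    (fun _ => ([] : List (Int × Int))) PySem.Dict.empty
    (fun a _ => PySem.Dict.contains_empty a)
    (by simpa using pv_nodup_cells grid rows cols)
  simpa using this

-- the flattened (cell, neighbor) pair list of the second pass
def pvPairs (grid : List (List String)) (rows cols : Int) : List ((Int × Int) × (Int × Int)) :=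
  (pvCellsL grid rows cols).flatMap (fun k => (pvNbrs grid rows cols k.1 k.2).map (fun n => (k, n)))

-- A's second pass = one modify-fold over pvPairs
theorem pv_pm1_flat (grid : List (List String)) (rows cols : Int)
    (d : PySem.Dict (Int × Int) (List (Int × Int))) :
    ((PySem.List.pyRange 0 rows).foldl (fun d r =>
        (PySem.List.pyRange 0 cols).foldl (fun d c =>
          if pvCell grid r c ≠ "1" then
            ([((-1 : Int), (0 : Int)), (1, 0), (0, -1), (0, 1)]).foldl (fun d dd =>
              let nr := r + dd.1
              let nc := c + dd.2
              if 0 ≤ nr ∧ nr < rows ∧ 0 ≤ nc ∧ nc < cols ∧ pvCell grid nr nc ≠ "1" then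
                d.modify (r, c) [] (· ++ [(nr, nc)])
              else d) d
          else d) d) d) =
      (pvPairs grid rows cols).foldl (fun d p => d.modify p.1 [] (· ++ [p.2])) d := by
  have hcell : ∀ (d : PySem.Dict (Int × Int) (List (Int × Int))) (r c : Int),
      ([((-1 : Int), (0 : Int)), (1, 0), (0, -1), (0, 1)]).foldl (fun d dd =>
          let nr := r + dd.1
          let nc := c + dd.2
          if 0 ≤ nr ∧ nr < rows ∧ 0 ≤ nc ∧ nc < cols ∧ pvCell grid nr nc ≠ "1" then
            d.modify (r, c) [] (· ++ [(nr, nc)])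
          else d) d =
        ((pvNbrs grid rows cols r c).map (fun n => ((r, c), n))).foldl
          (fun d p => d.modify p.1 [] (· ++ [p.2])) d :=
    fun d r c => pv_per_cell grid rows cols r c d
  calc
    _ = (PySem.List.pyRange 0 rows).foldl (fun d r =>
          (PySem.List.pyRange 0 cols).foldl (fun d c =>
            if pvCell grid r c ≠ "1" then
              ((pvNbrs grid rows cols r c).map (fun n => ((r, c), n))).foldl
                (fun d p => d.modify p.1 [] (· ++ [p.2])) d
            else d) d) d := by
        congr 1
        funext d r
        congr 1
        funext d c
        by_cases h : pvCell grid r c ≠ "1" <;> simp only [h, if_false, hcell d r c]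
    _ = _ := by
        rw [pvPairs, pvCellsL]
        rw [List.flatMap_assoc, List.foldl_flatMap]
        congr 1
        funext d r
        rw [List.filterMap_eq_flatMap_toList, List.flatMap_assoc, List.foldl_flatMap]
        congr 1
        funext d c
        by_cases h : pvCell grid r c ≠ "1" <;> simp [h]

theorem pv_pm1_items (grid : List (List String)) (rows cols : Int) :
    ((pvPairs grid rows cols).foldl (fun d p => d.modify p.1 [] (· ++ [p.2]))
        ((pvCellsL grid rows cols).foldl (fun d k => d.insert k ([] : List (Int × Int)))
          PySem.Dict.empty)).items = pvBase grid rows cols := by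
  set cells := pvCellsL grid rows cols with hc
  set pm0 := cells.foldl (fun d k => d.insert k ([] : List (Int × Int))) PySem.Dict.empty with hpm0
  have hitems0 : pm0.items = cells.map (fun k => (k, ([] : List (Int × Int)))) :=
    pv_pm0_items grid rows cols
  have hkeys0 : pm0.keys = cells := by
    show pm0.items.map Prod.fst = cells
    rw [hitems0, List.map_map]
    exact List.map_congr_left (fun a _ => rfl) |>.trans (List.map_id _)
  have hnodup0 : pm0.keys.Nodup := by rw [hkeys0]; exact pv_nodup_cells grid rows cols
  have hcont : ∀ p ∈ pvPairs grid rows cols, pm0.contains p.1 = true := by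
    rintro ⟨k, n⟩ hp
    rw [PySem.Dict.contains_iff_mem_keys, hkeys0]
    simp only [pvPairs, List.mem_flatMap, List.mem_map] at hp
    obtain ⟨a, ha, b, -, h⟩ := hp
    obtain ⟨rfl, -⟩ := Prod.mk.injEq .. ▸ h
    exact ha
  set fin := (pvPairs grid rows cols).foldl (fun d p => d.modify p.1 [] (· ++ [p.2])) pm0 with hfin
  have hkeys : fin.keys = cells := by
    rw [hfin, pv_keys_foldl_modify _ _ hcont, hkeys0]
  have hnodup : fin.keys.Nodup := by rw [hkeys]; exact pv_nodup_cells grid rows cols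
  rw [pv_items_eq_keys_map fin [] hnodup, hkeys, pvBase]
  apply List.map_congr_left
  intro k hk
  have hgd : fin.getD k [] = pm0.getD k [] ++
      (((pvPairs grid rows cols).filter (fun p => p.1 == k)).map (fun p => p.2)) :=
    PySem.Dict.getD_foldl_modify_append _ _ _
  have h0 : pm0.getD k [] = [] := by
    apply PySem.Dict.getD_of_mem_items (d := pm0) _ hnodup0
    rw [hitems0]
    exact List.mem_map.2 ⟨k, hk, rfl⟩
  have hfilter : ((pvPairs grid rows cols).filter (fun p => p.1 == k)) =
      (pvNbrs grid rows cols k.1 k.2).map (fun n => (k, n)) :=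
    pv_filter_flatMap_pairs cells _ k (pv_nodup_cells grid rows cols) hk
  rw [hgd, h0, hfilter, List.map_map, List.nil_append]
  simp

theorem pv_inner_id (k : Int × Int) (v : List (Int × Int))
    (pm : PySem.Dict (Int × Int) (List (Int × Int))) (qs : List (Int × Int))
    (h : ∀ n ∈ v, pm.contains n = true → k ∈ pm.getD n []) :
    v.foldl (ac3Inner k) (pm, false, qs) = (pm, false, qs) := by
  induction v with
  | nil => rfl
  | cons n t ih =>
    have hstep : ac3Inner k (pm, false, qs) n = (pm, false, qs) := by
      have hcond : ¬(pm.contains n = true ∧ k ∉ pm.getD n []) := by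
        rintro ⟨h1, h2⟩
        exact h2 (h n (by simp) h1)
      simp [ac3Inner, if_neg hcond]
    rw [List.foldl_cons, hstep]
    exact ih (fun n hn hc => h n (List.mem_cons_of_mem _ hn) hc)

theorem pv_ac3_loop (rest done : List ((Int × Int) × List (Int × Int)))
    (pm : PySem.Dict (Int × Int) (List (Int × Int)))
    (hnd : ((done ++ rest).map Prod.fst).Nodup)
    (hsym : ∀ p ∈ done ++ rest, ∀ n ∈ p.2, ∃ w, (n, w) ∈ done ++ rest ∧ p.1 ∈ w)
    (hitems : pm.items = done.filter (fun p => !p.2.isEmpty) ++ rest) :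
    (ac3Loop rest.length (rest.map Prod.fst) pm).items =
      (done ++ rest).filter (fun p => !p.2.isEmpty) := by
  induction rest generalizing done pm with
  | nil => simpa [ac3Loop] using hitems
  | cons kv rest' ih =>
    obtain ⟨k, v⟩ := kv
    have hpmnd : pm.keys.Nodup := by
      have hsub : pm.keys.Sublist ((done ++ (k, v) :: rest').map Prod.fst) := by
        show (pm.items.map Prod.fst).Sublist _
        rw [hitems, List.map_append, List.map_append]
        exact List.Sublist.append (List.Sublist.map Prod.fst List.filter_sublist) (List.Sublist.refl _)
      exact hnd.sublist hsub
    have hmemkv : ((k, v) : (Int × Int) × List (Int × Int)) ∈ pm.items := by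
      rw [hitems]; exact List.mem_append_right _ (List.mem_cons_self ..)
    have hget : pm.getD k [] = v := PySem.Dict.getD_of_mem_items pm hmemkv hpmnd []
    have hsubpm : ∀ q ∈ pm.items, q ∈ done ++ (k, v) :: rest' := by
      intro q hq
      rw [hitems] at hq
      rcases List.mem_append.1 hq with hq | hq
      · exact List.mem_append_left _ (List.mem_of_mem_filter hq)
      · exact List.mem_append_right _ hq
    have hknotfst : k ∉ (done.map Prod.fst) ∧ k ∉ (rest'.map Prod.fst) := by
      rw [List.map_append, List.nodup_append] at hnd
      obtain ⟨h1, h2, h3⟩ := hnd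
      constructor
      · intro hk; exact h3 _ hk k (by simp) rfl
      · simp only [List.map_cons, List.nodup_cons] at h2
        exact h2.1
    show (ac3Loop (rest'.length + 1) (k :: rest'.map Prod.fst) pm).items = _
    rw [ac3Loop]
    by_cases hv : v = []
    · subst hv
      simp only [hget, if_pos, List.isEmpty_nil, List.foldl_nil]
      have herase : (pm.erase k).items = done.filter (fun p => !p.2.isEmpty) ++ rest' := by
        show (pm.items.filter _) = _
        rw [hitems, List.filter_append, List.filter_cons]
        have hk1 : ∀ q ∈ done.filter (fun p => !p.2.isEmpty),
            (!(q.1 == k)) = true := by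
          intro q hq
          have : q.1 ∈ done.map Prod.fst :=
            List.mem_map.2 ⟨q, List.mem_of_mem_filter hq, rfl⟩
          simp only [Bool.not_eq_true', beq_eq_false_iff_ne, ne_eq]
          rintro rfl; exact hknotfst.1 this
        have hk2 : ∀ q ∈ rest', ((!(q.1 == k)) : Bool) = true := by
          intro q hq
          have : q.1 ∈ rest'.map Prod.fst := List.mem_map.2 ⟨q, hq, rfl⟩
          simp only [Bool.not_eq_true', beq_eq_false_iff_ne, ne_eq]
          rintro rfl; exact hknotfst.2 this
        rw [List.filter_eq_self.2 hk1, List.filter_eq_self.2 hk2]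
        simp
      have := ih (done ++ [(k, [])]) (pm.erase k)
        (by rwa [List.append_cons] at hnd)
        (by rw [← List.append_cons]at *; exact hsym)
        (by rw [herase, List.filter_append]; simp)
      rw [List.append_assoc, List.singleton_append] at this
      exact this
    · have hie : v.isEmpty = false := by simpa using hv
      simp only [hget, hie, Bool.false_eq_true, if_false]
      have hin : v.foldl (ac3Inner k) (pm, false, rest'.map Prod.fst) =
          (pm, false, rest'.map Prod.fst) := by
        apply pv_inner_id
        intro n hn hc
        have hkv : ((k, v) : (Int × Int) × List (Int × Int)) ∈ done ++ (k, v) :: rest' :=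
          List.mem_append_right _ (List.mem_cons_self ..)
        obtain ⟨w, hw, hkw⟩ := hsym (k, v) hkv n hn
        have hc' : n ∈ pm.keys := (PySem.Dict.contains_iff_mem_keys pm n).1 hc
        obtain ⟨q, hq, hqfst⟩ := List.mem_map.1 hc'
        obtain ⟨n', w'⟩ := q
        cases hqfst
        have hq' : (n', w') ∈ done ++ (k, v) :: rest' := hsubpm _ hq
        have hweq : w' = w := pv_assoc_unique hnd hq' hw
        have hgd : pm.getD n' [] = w' := PySem.Dict.getD_of_mem_items pm hq hpmnd []
        rw [hgd, hweq]
        exact hkw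
      rw [hin]
      have := ih (done ++ [(k, v)]) pm
        (by rwa [List.append_cons] at hnd)
        (by rw [← List.append_cons] at *; exact hsym)
        (by rw [hitems, List.filter_append, List.filter_cons]
            simp [hv])
      rw [List.append_assoc, List.singleton_append] at this
      exact this


theorem pv_if_not {γ : Type} (b : Bool) (x y : Option γ) :
    (if b = true then x else y) = (if (!b) = true then y else x) := by cases b <;> rfl

theorem pv_map_filter_map {α β γ : Type} (f : α → β) (p : β → Bool) (g : β → γ) (l : List α) :
    ((l.map f).filter p).map g =
      l.filterMap (fun a => if p (f a) then some (g (f a)) else none) := by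
  induction l with
  | nil => rfl
  | cons a t ih =>
    simp only [List.map_cons, List.filter_cons, List.filterMap_cons]
    by_cases h : p (f a) = true <;> simp [h, ih]

theorem pv_alt_eq (grid : List (List String)) :
    min_consistent_ac3_alt grid =
      ((pvBase grid grid.length (PySem.List.pyGetD grid 0 []).length).filter
        (fun p => !p.2.isEmpty)).map (fun p => (p.1.1, p.1.2, p.2)) := by
  rw [pvBase, pv_map_filter_map, pvCellsL, List.filterMap_flatMap]
  show _ = List.flatMap _ _
  simp only [min_consistent_ac3_alt]
  congr 1
  funext r
  rw [List.filterMap_filterMap]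
  congr 1
  funext c
  by_cases h : pvCell grid r c ≠ "1"
  · rw [if_pos h, if_pos h]
    exact pv_if_not _ _ _
  · rw [if_neg h, if_neg h]
    rfl

theorem pv_sym_base (grid : List (List String)) (rows cols : Int) :
    ∀ p ∈ pvBase grid rows cols, ∀ n ∈ p.2, ∃ w, (n, w) ∈ pvBase grid rows cols ∧ p.1 ∈ w := by
  rintro p hp n hn
  rw [pvBase] at hp
  obtain ⟨k, hk, rfl⟩ := List.mem_map.1 hp
  obtain ⟨hncell, hkn⟩ := pv_sym hk hn
  exact ⟨pvNbrs grid rows cols n.1 n.2, List.mem_map.2 ⟨n, hncell, rfl⟩, hkn⟩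

theorem pv_base_map_fst (grid : List (List String)) (rows cols : Int) :
    (pvBase grid rows cols).map Prod.fst = pvCellsL grid rows cols := by
  rw [pvBase, List.map_map]
  exact List.map_congr_left (fun a _ => rfl) |>.trans (List.map_id _)

theorem pv_main (grid : List (List String)) :
    min_consistent_ac3 grid = min_consistent_ac3_alt grid := by
  rw [min_consistent_ac3, pv_alt_eq]
  set rows : Int := (grid.length : Int) with hrows
  set cols : Int := ((PySem.List.pyGetD grid 0 []).length : Int) with hcols
  have hpm1 : ((PySem.List.pyRange 0 rows).foldl (fun d r =>
      (PySem.List.pyRange 0 cols).foldl (fun d c =>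
        if pvCell grid r c ≠ "1" then
          ([((-1 : Int), (0 : Int)), (1, 0), (0, -1), (0, 1)]).foldl (fun d dd =>
            let nr := r + dd.1
            let nc := c + dd.2
            if 0 ≤ nr ∧ nr < rows ∧ 0 ≤ nc ∧ nc < cols ∧ pvCell grid nr nc ≠ "1" then
              d.modify (r, c) [] (· ++ [(nr, nc)])
            else d) d
        else d) d)
      ((PySem.List.pyRange 0 rows).foldl (fun d r =>
        (PySem.List.pyRange 0 cols).foldl (fun d c =>
          if pvCell grid r c ≠ "1" then d.insert (r, c) ([] : List (Int × Int)) else d) d)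
        PySem.Dict.empty)).items = pvBase grid rows cols := by
    rw [pv_pm0, pv_pm1_flat, pv_pm1_items]
  set pm1 := (PySem.List.pyRange 0 rows).foldl (fun d r =>
      (PySem.List.pyRange 0 cols).foldl (fun d c =>
        if pvCell grid r c ≠ "1" then
          ([((-1 : Int), (0 : Int)), (1, 0), (0, -1), (0, 1)]).foldl (fun d dd =>
            let nr := r + dd.1
            let nc := c + dd.2
            if 0 ≤ nr ∧ nr < rows ∧ 0 ≤ nc ∧ nc < cols ∧ pvCell grid nr nc ≠ "1" then
              d.modify (r, c) [] (· ++ [(nr, nc)])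
            else d) d
        else d) d)
      ((PySem.List.pyRange 0 rows).foldl (fun d r =>
        (PySem.List.pyRange 0 cols).foldl (fun d c =>
          if pvCell grid r c ≠ "1" then d.insert (r, c) ([] : List (Int × Int)) else d) d)
        PySem.Dict.empty) with hpm1def
  have hkeys : pm1.keys = (pvBase grid rows cols).map Prod.fst := by
    show pm1.items.map Prod.fst = _
    rw [hpm1]
  have hloop := pv_ac3_loop (pvBase grid rows cols) [] pm1
    (by simpa [pv_base_map_fst] using pv_nodup_cells grid rows cols)
    (by simpa using pv_sym_base grid rows cols)
    (by simpa using hpm1)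
  simp only [List.nil_append] at hloop
  rw [hkeys, List.length_map, hloop]


-- ===== VERDICT (by name: the statement is the Claim_ definition above) =====
theorem min_consistent_ac3_spec : Claim_equal_min_consistent_ac3 := by
  intro grid _ _
  unfold Spec_min_consistent_ac3
  exact pv_main grid
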